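-- pv_equiv track=rewrite | github.com/DmitryKochetkov/polyakov_py | solutions24/problem174_old.py | count_closed_substrings
-- ===== SOURCE A (Python) =====
-- def count_closed_substrings(line):
--     result = 0
--     nearest_position = dict()
--
--     for i in range(len(line)):
--         if line[i] in nearest_position.keys():
--             if nearest_position[line[i]] != i-1:
--                 result += 1
--
--         nearest_position[line[i]] = i
--         # else:
--         #     result += 1
--
--     return result
-- ===== SOURCE B (Python) =====
-- def count_closed_substrings(line):
--     # Phase 1: index the string — map each character to the list of its positions.
--     positions = {}
--     for i, c in enumerate(line):
--         positions.setdefault(c, []).append(i)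
--     # Phase 2: per character, count consecutive occurrence pairs that are not adjacent.
--     result = 0
--     for idx in positions.values():
--         for prev, cur in zip(idx, idx[1:]):
--             if cur - prev != 1:
--                 result += 1
--     return result
-- ===== Notes on version B (the rewrite author's own statement) =====
-- stated objective: alternative
-- what changed: Replaces A's single streaming pass that keeps a dict of each character's last-seen position by a two-phase grouping algorithm: first build an index dict mapping each character to its (increasing) list of occurrence positions, then count, per character, the consecutive occurrence pairs whose gap is not 1.
import Mathlib
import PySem

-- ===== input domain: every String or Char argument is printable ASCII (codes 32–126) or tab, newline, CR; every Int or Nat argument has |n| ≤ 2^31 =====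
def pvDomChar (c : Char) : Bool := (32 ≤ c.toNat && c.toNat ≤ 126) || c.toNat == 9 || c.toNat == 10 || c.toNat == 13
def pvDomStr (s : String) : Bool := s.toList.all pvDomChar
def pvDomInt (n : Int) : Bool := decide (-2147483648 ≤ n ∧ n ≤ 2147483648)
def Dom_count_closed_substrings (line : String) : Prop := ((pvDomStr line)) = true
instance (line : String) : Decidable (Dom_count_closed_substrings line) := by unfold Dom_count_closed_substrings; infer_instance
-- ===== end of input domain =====

-- B replaces A's streaming dict-of-last-positions pass by a two-phase algorithm: build an index
-- dict char → increasing list of occurrence positions, then count per character the consecutive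
-- occurrence pairs with gap ≠ 1 (objective: alternative; same return value, no side effects).

-- ===== PORT A =====
-- one iteration of A's loop: membership test in the dict, compare stored position with i-1, then store i
def pvA_step (l : List Char) (st : Int × PySem.Dict Char Int) (i : Int) : Int × PySem.Dict Char Int :=
  let c := PySem.List.pyGetD l i ' '
  let result :=
    if st.2.contains c then
      if st.2.get? c ≠ some (i - 1) then st.1 + 1 else st.1
    else st.1
  (result, st.2.insert c i)

def count_closed_substrings (line : String) : Int :=
  ((PySem.List.pyRange 0 (line.toList.length : Int) 1).foldl (pvA_step line.toList)
    (0, PySem.Dict.empty)).1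

-- ===== PORT B =====
-- phase 1: positions[c] = positions.get(c, []) + [i] for i, c in enumerate(line)
def pvB_build (l : List Char) : PySem.Dict Char (List Int) :=
  (PySem.List.enumerate l).foldl (fun d p => d.modify p.2 [] (· ++ [p.1])) PySem.Dict.empty

-- phase 2 inner loop: for prev, cur in zip(idx, idx[1:]): if cur - prev != 1: result += 1
def pvB_pairs (acc : Int) (idx : List Int) : Int :=
  (idx.zip (PySem.List.slice idx (some 1) none)).foldl
    (fun r pq => if pq.2 - pq.1 ≠ 1 then r + 1 else r) acc

def count_closed_substrings_alt (line : String) : Int :=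
  ((pvB_build line.toList).values).foldl pvB_pairs 0

-- ===== PRECONDITION & SPEC =====
def Spec_count_closed_substrings (line : String) (out : Int) : Prop := out = count_closed_substrings_alt line
instance (line : String) (out : Int) : Decidable (Spec_count_closed_substrings line out) := by unfold Spec_count_closed_substrings; infer_instance

-- ===== CLAIM (what is proved, stated in full; the proofs are below) =====
def Claim_equal_count_closed_substrings : Prop := ∀ (line : String), Dom_count_closed_substrings line → Spec_count_closed_substrings line (count_closed_substrings line)

-- ===== LEMMAS AND PROOFS =====

-- occurrence positions of c in m, in increasing order (proof-side characterisation of B's index)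
def pvPos (m : List Char) (c : Char) : List Int :=
  ((PySem.List.enumerate m).filter (fun p => p.2 == c)).map (·.1)

-- the per-list pair count, accumulator split off
def pvPc (idx : List Int) : Int := pvB_pairs 0 idx

theorem pv_foldl_shift (l : List (Int × Int)) (acc : Int) :
    l.foldl (fun r pq => if pq.2 - pq.1 ≠ 1 then r + 1 else r) acc
      = acc + l.foldl (fun r pq => if pq.2 - pq.1 ≠ 1 then r + 1 else r) 0 := by
  induction l generalizing acc with
  | nil => simp
  | cons p t ih =>
    simp only [List.foldl_cons]
    rw [ih, ih (if p.2 - p.1 ≠ 1 then 0 + 1 else 0)]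
    split_ifs <;> ring

theorem pvB_pairs_acc (acc : Int) (idx : List Int) : pvB_pairs acc idx = acc + pvPc idx := by
  unfold pvB_pairs pvPc pvB_pairs
  exact pv_foldl_shift _ acc

theorem pv_getD_build (m : List Char) (c : Char) :
    (pvB_build m).getD c [] = pvPos m c := by
  unfold pvB_build pvPos
  have hswap : (PySem.List.enumerate m).foldl
      (fun d p => d.modify p.2 [] (· ++ [p.1])) PySem.Dict.empty
      = ((PySem.List.enumerate m).map Prod.swap).foldl
          (fun d p => d.modify p.1 [] (· ++ [p.2])) PySem.Dict.empty := by
    rw [List.foldl_map]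
    simp [Prod.swap]
  rw [hswap, PySem.Dict.getD_foldl_modify_append, PySem.Dict.getD_empty]
  simp [List.filter_map, List.map_map, Function.comp_def]

theorem pv_keys_build (m : List Char) :
    (pvB_build m).keys = PySem.Set.ofList m := by
  unfold pvB_build
  rw [PySem.Dict.keys_foldl_modify_key (PySem.List.enumerate m)
      (fun p : Int × Char => p.2) [] (fun _ (p : Int × Char) v => v ++ [p.1]) PySem.Dict.empty]
  rw [PySem.Dict.keys_empty, PySem.List.map_snd_enumerate, PySem.Set.update_nil_left]

theorem pv_nodup_keys_build (m : List Char) : (pvB_build m).keys.Nodup := by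
  unfold pvB_build
  exact PySem.Dict.nodup_keys_foldl_modify_key _ (fun p : Int × Char => p.2) []
    (fun _ (p : Int × Char) v => v ++ [p.1]) _
    (by rw [PySem.Dict.keys_empty]; exact List.nodup_nil)

def pvBval (m : List Char) : Int := ((pvB_build m).values).foldl pvB_pairs 0

theorem pvBval_eq_sum (m : List Char) :
    pvBval m = ((PySem.Set.ofList m).map (fun c => pvPc (pvPos m c))).sum := by
  unfold pvBval
  rw [PySem.Dict.values_eq_map_keys (pvB_build m) (pv_nodup_keys_build m) []]
  rw [List.foldl_map]
  simp only [pvB_pairs_acc]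
  rw [PySem.List.foldl_add _ (fun k => pvPc ((pvB_build m).getD k [])) 0, zero_add,
    pv_keys_build]
  simp only [pv_getD_build]

theorem pvPos_append (m : List Char) (a c : Char) :
    pvPos (m ++ [a]) c = pvPos m c ++ (if a == c then [(m.length : Int)] else []) := by
  by_cases h : a = c <;>
    simp [pvPos, PySem.List.enumerate_append, PySem.List.enumerate_cons,
      PySem.List.enumerate_nil, List.filter_append, h]

theorem pvPos_nil_iff (m : List Char) (c : Char) : pvPos m c = [] ↔ c ∉ m := by
  rw [pvPos, List.map_eq_nil_iff, List.filter_eq_nil_iff]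
  constructor
  · intro h hc
    have : c ∈ (PySem.List.enumerate m 0).map (fun x => x.2) := by
      rw [PySem.List.map_snd_enumerate]; exact hc
    obtain ⟨p, hp, hp2⟩ := List.mem_map.mp this
    exact h p hp (by simp [hp2])
  · intro h p hp hbe
    apply h
    rw [← PySem.List.map_snd_enumerate m 0, List.mem_map]
    exact ⟨p, hp, by simpa using hbe⟩

theorem pv_zip_tail_append (xs : List Int) (v : Int) :
    (xs ++ [v]).zip (xs ++ [v]).tail
      = xs.zip xs.tail ++ (match xs.getLast? with
        | none => []
        | some j => [(j, v)]) := by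
  induction xs with
  | nil => simp
  | cons x t ih =>
    cases t with
    | nil => simp
    | cons y t' =>
      have h : ((x :: y :: t') ++ [v]).zip ((x :: y :: t') ++ [v]).tail
          = (x, y) :: ((y :: t') ++ [v]).zip ((y :: t') ++ [v]).tail := by
        simp
      rw [h, ih]
      simp [List.getLast?_cons_cons]

theorem pvPc_append (xs : List Int) (v : Int) :
    pvPc (xs ++ [v]) = pvPc xs +
      (match xs.getLast? with
       | none => 0
       | some j => if v - j ≠ 1 then 1 else 0) := by
  unfold pvPc pvB_pairs
  rw [PySem.List.slice_from_one, PySem.List.slice_from_one, pv_zip_tail_append,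
    List.foldl_append]
  rw [pv_foldl_shift]
  cases h : xs.getLast? <;> simp

theorem pv_sum_ite (S : List Char) (hS : S.Nodup) (a : Char) (d : Int) :
    (S.map (fun c => if c = a then d else 0)).sum = if a ∈ S then d else 0 := by
  induction S with
  | nil => simp
  | cons x t ih =>
    obtain ⟨hx, ht⟩ := List.nodup_cons.mp hS
    simp only [List.map_cons, List.sum_cons, ih ht, List.mem_cons]
    by_cases h : x = a
    · subst h
      simp [hx]
    · simp [h, Ne.symm h]

theorem pvBval_append (m : List Char) (a : Char) :
    pvBval (m ++ [a]) = pvBval m +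
      (match (pvPos m a).getLast? with
       | none => 0
       | some j => if (m.length : Int) - j ≠ 1 then 1 else 0) := by
  have hpt : ∀ c, pvPc (pvPos (m ++ [a]) c)
      = pvPc (pvPos m c) +
        (if c = a then
          (match (pvPos m a).getLast? with
           | none => (0 : Int)
           | some j => if (m.length : Int) - j ≠ 1 then 1 else 0)
         else 0) := by
    intro c
    by_cases h : c = a
    · subst h
      rw [pvPos_append]
      simp only [BEq.rfl, if_pos]
      simpa using pvPc_append (pvPos m c) (m.length : Int)
    · have hne : (a == c) = false := by simp [Ne.symm h]
      rw [pvPos_append, hne]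
      simp [h]
  rw [pvBval_eq_sum, pvBval_eq_sum, PySem.Set.ofList_append, PySem.Set.update_cons,
    PySem.Set.update_nil]
  by_cases hm : a ∈ PySem.Set.ofList m
  · have hadd : (PySem.Set.ofList m).add a = PySem.Set.ofList m := by
      simp [PySem.Set.add, hm]
    rw [hadd]
    simp only [hpt]
    rw [PySem.List.sum_map_add_int, pv_sum_ite _ (PySem.Set.nodup_ofList m) a _, if_pos hm]
  · have hadd : (PySem.Set.ofList m).add a = PySem.Set.ofList m ++ [a] := by
      simp [PySem.Set.add, hm]
    have hnil : pvPos m a = [] :=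
      (pvPos_nil_iff m a).mpr (fun hmem => hm ((PySem.Set.mem_ofList m a).mpr hmem))
    rw [hadd, List.map_append, List.sum_append]
    simp only [hpt]
    rw [PySem.List.sum_map_add_int, pv_sum_ite _ (PySem.Set.nodup_ofList m) a _, if_neg hm]
    simp [hnil, pvPc, pvB_pairs]

theorem pvMain (l : List Char) (n : Nat) (hn : n ≤ l.length) :
    (∀ c, (((PySem.List.pyRange 0 (n:Int) 1).foldl (pvA_step l) (0, PySem.Dict.empty)).2).get? c
        = (pvPos (l.take n) c).getLast?)
    ∧ (((PySem.List.pyRange 0 (n:Int) 1).foldl (pvA_step l) (0, PySem.Dict.empty)).1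
        = pvBval (l.take n)) := by
  induction n with
  | zero =>
    refine ⟨fun c => ?_, ?_⟩
    · simp [PySem.List.pyRange_one_eq_nil, pvPos, PySem.List.enumerate_nil,
        PySem.Dict.get?_empty]
    · simp [PySem.List.pyRange_one_eq_nil]
      rfl
  | succ n ih =>
    obtain ⟨ihd, ihc⟩ := ih (by omega)
    have hlt : n < l.length := by omega
    have hcast : ((n + 1 : Nat) : Int) = (n : Int) + 1 := by push_cast; ring
    have hpeel : PySem.List.pyRange 0 ((n : Int) + 1) 1
        = PySem.List.pyRange 0 (n : Int) 1 ++ [(n : Int)] :=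
      PySem.List.pyRange_one_succ_right (by positivity)
    have htake : l.take (n + 1) = l.take n ++ [l[n]] := by
      rw [List.take_add_one]
      simp [List.getElem?_eq_getElem hlt]
    have hgetc : PySem.List.pyGetD l (n : Int) ' ' = l[n] := by
      rw [PySem.List.pyGetD_natCast]
      simp [List.getD_eq_getElem?_getD, List.getElem?_eq_getElem hlt]
    have hlen : (l.take n).length = n := by simp [List.length_take, Nat.min_eq_left (le_of_lt hlt)]
    rw [hcast, hpeel]
    constructor
    · intro c
      rw [List.foldl_append]
      simp only [List.foldl_cons, List.foldl_nil, pvA_step, hgetc]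
      rw [PySem.Dict.get?_insert, htake, pvPos_append, hlen]
      by_cases hc : c = l[n]
      · simp [hc]
      · have hbe : (l[n] == c) = false := by simp [Ne.symm hc]
        rw [hbe]
        simp [hc, ihd c]
    · rw [List.foldl_append]
      simp only [List.foldl_cons, List.foldl_nil, pvA_step, hgetc]
      rw [htake, pvBval_append, hlen, ihc,
        PySem.Dict.contains_eq_isSome_get?, ihd]
      cases hlast : (pvPos (l.take n) (l[n])).getLast? with
      | none => simp
      | some j =>
        simp only [Option.isSome_some, if_true]
        by_cases hj : j = (n : Int) - 1
        · rw [if_neg (by simp [hj]), if_neg (by omega)]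
          ring
        · rw [if_pos (by simpa using hj), if_pos (by omega)]

-- ===== VERDICT (by name: the statement is the Claim_ definition above) =====
theorem count_closed_substrings_spec : Claim_equal_count_closed_substrings := by
  intro line _
  unfold Spec_count_closed_substrings count_closed_substrings count_closed_substrings_alt
  have h := (pvMain line.toList line.toList.length le_rfl).2
  rw [List.take_length] at h
  exact h
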